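-- pv_equiv track=rewrite | github.com/IgrMd/yandex-algos-training | Тренировки по алгоритмам 3.0/Дивизион B/Тема 4. Динамическое программирование с двумя параметрами/29.py | lunches
-- ===== SOURCE A (Python) =====
-- def lunches(n, cost):
--     max_cost = 10 ** 6
--     dp = [[max_cost for j in range(n + 1)] for i in range(n + 1)]
--     dp[0][0] = 0
--     prev = [[[0, 0] for j in range(n + 1)] for i in range(n + 1)]
--     for i in range(1, n + 1):
--         for j in range(n + 1):
--             for_coupon = dp[i - 1][j + 1] if j < n else max_cost
--             if cost[i] > 100:
--                 coupon_granted = 1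
--                 for_money = dp[i - 1][j - 1] + cost[i]
--             else:
--                 for_money = dp[i - 1][j] + cost[i]
--                 coupon_granted = 0
--             if for_coupon < for_money:
--                 coupon_granted = -1
--                 dp[i][j] = for_coupon
--                 prev[i][j][0] = j + 1
--             else:
--                 dp[i][j] = for_money
--                 prev[i][j][0] = j - 1 if coupon_granted else j
--             prev[i][j][1] = coupon_granted
--     min_cost = max_cost
--     coupons_left = n
--     for j, value in enumerate(dp[-1]):
--         if value <= min_cost:
--             min_cost = value
--             coupons_left = j
--     i = n
--     j = coupons_left
--     days_coupon_spent = []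
--     coupons_spent = 0
--     while i > 0:
--         if prev[i][j][1] == -1:
--             days_coupon_spent.append(i)
--             coupons_spent += 1
--         j = prev[i][j][0]
--         i -= 1
--     return min(dp[n]), coupons_left, coupons_spent, days_coupon_spent[::-1]
-- ===== SOURCE B (Python) =====
-- def lunches(n, cost):
--     max_cost = 10 ** 6
--     # One forward pass; each cell carries (value, coupon-days list) so no
--     # back-pointer table and no backtracking loop are needed.
--     row = [(0, [])] + [(max_cost, []) for _ in range(n)]
--     rows = [row]
--     for i in range(1, n + 1):
--         prev_row = rows[i - 1]
--         new_row = []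
--         for j in range(n + 1):
--             if j < n:
--                 for_coupon, coupon_path = prev_row[j + 1][0], prev_row[j + 1][1] + [i]
--             else:
--                 for_coupon, coupon_path = max_cost, []  # no state to take a coupon from
--             src = j - 1 if cost[i] > 100 else j
--             for_money = prev_row[src][0] + cost[i]
--             if for_coupon < for_money:
--                 new_row.append((for_coupon, coupon_path))
--             else:
--                 new_row.append((for_money, prev_row[src][1]))
--         rows.append(new_row)
--     vals = [v for v, _ in rows[n]]
--     best = min(vals)
--     coupons_left = n - vals[::-1].index(best)
--     days = rows[n][coupons_left][1]
--     return best, coupons_left, len(days), days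
-- ===== Notes on version B (the rewrite author's own statement) =====
-- stated objective: alternative
-- what changed: B carries the partial coupon-day list inside each DP cell during the single forward pass and reads the answer directly (min of the last value row plus last index of that minimum via the reversed row), eliminating A's back-pointer table, its <=-update enumerate scan and its backtracking while-loop; Pre_ restricts to the problem's natural domain (nonnegative lunch costs totalling less than the 10**6 sentinel): outside it A raises IndexError on some inputs and on others returns coupon-day lists contaminated by sentinel states, which B does not reproduce.
-- outside the precondition, e.g. on lunches(1, [2000000, 2000000]): A returns (1000000, 1, 1, [1]), B returns (1000000, 1, 0, []); on lunches(1, [0, -5]): A returns (-5, 0, 0, []), B returns (-5, 0, 0, [])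
import Mathlib
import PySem

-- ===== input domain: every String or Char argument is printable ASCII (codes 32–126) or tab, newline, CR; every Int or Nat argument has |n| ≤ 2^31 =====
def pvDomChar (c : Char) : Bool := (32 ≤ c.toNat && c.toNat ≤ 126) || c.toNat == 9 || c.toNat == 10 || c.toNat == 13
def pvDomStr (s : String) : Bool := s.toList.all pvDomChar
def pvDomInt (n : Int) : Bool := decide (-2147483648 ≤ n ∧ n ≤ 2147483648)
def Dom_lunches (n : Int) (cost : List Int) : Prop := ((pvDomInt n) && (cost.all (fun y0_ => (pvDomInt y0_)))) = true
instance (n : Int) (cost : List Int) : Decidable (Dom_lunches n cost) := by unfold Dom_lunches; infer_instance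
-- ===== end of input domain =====

-- B stores the partial coupon-day list in each DP cell during the one forward pass, so A's
-- back-pointer table, its <=-scan and its backtracking while-loop disappear (alternative
-- decomposition, same cost class).

-- ===== PORT A =====
-- A-side helper: the 'while i > 0' backtracking loop (i decreases by 1 each iteration,
-- so it is structural recursion on i cast to Nat; i = k in the recursion below).
def lunchesBT (prev : List (List (Int × Int))) : Nat → Int → (List Int × Int) → (List Int × Int)
  | 0, _, acc => acc
  | k+1, j, acc =>
      let e := PySem.List.pyGetD (PySem.List.pyGetD prev ((k : Int)+1) []) j ((0:Int),(0:Int))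
      let acc := if e.2 = -1 then (acc.1 ++ [(k : Int)+1], acc.2 + 1) else acc
      lunchesBT prev k e.1 acc

-- A-side helper: the body of the inner `for j in range(n + 1)` loop, verbatim
def lunchesStep (n : Int) (cost : List Int) (i : Int)
    (st : List (List Int) × List (List (Int × Int))) (j : Int) :
    List (List Int) × List (List (Int × Int)) :=
  let max_cost : Int := 1000000
  let dp := st.1
  let prev := st.2
  let for_coupon := if j < n then PySem.List.pyGetD (PySem.List.pyGetD dp (i-1) []) (j+1) 0 else max_cost
  let ci := PySem.List.pyGetD cost i 0
  -- (coupon_granted, for_money), assigned in the same branch order as the Python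
  let cg_fm : Int × Int :=
    if ci > 100 then (1, PySem.List.pyGetD (PySem.List.pyGetD dp (i-1) []) (j-1) 0 + ci)
    else (0, PySem.List.pyGetD (PySem.List.pyGetD dp (i-1) []) j 0 + ci)
  if for_coupon < cg_fm.2 then
    (PySem.List.pySetD dp i (PySem.List.pySetD (PySem.List.pyGetD dp i []) j for_coupon),
     PySem.List.pySetD prev i (PySem.List.pySetD (PySem.List.pyGetD prev i []) j (j+1, -1)))
  else
    (PySem.List.pySetD dp i (PySem.List.pySetD (PySem.List.pyGetD dp i []) j cg_fm.2),
     PySem.List.pySetD prev i (PySem.List.pySetD (PySem.List.pyGetD prev i []) j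
       (if cg_fm.1 ≠ 0 then j-1 else j, cg_fm.1)))

def lunches (n : Int) (cost : List Int) : Int × Int × Int × List Int :=
  let max_cost : Int := 1000000
  let dp0 : List (List Int) :=
    (PySem.List.pyRange 0 (n+1) 1).map (fun _ => (PySem.List.pyRange 0 (n+1) 1).map (fun _ => max_cost))
  let dp0 := PySem.List.pySetD dp0 0 (PySem.List.pySetD (PySem.List.pyGetD dp0 0 []) 0 0)
  let prev0 : List (List (Int × Int)) :=
    (PySem.List.pyRange 0 (n+1) 1).map (fun _ => (PySem.List.pyRange 0 (n+1) 1).map (fun _ => ((0:Int),(0:Int))))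
  let st := (PySem.List.pyRange 1 (n+1) 1).foldl (fun st i =>
      (PySem.List.pyRange 0 (n+1) 1).foldl (lunchesStep n cost i) st) (dp0, prev0)
  let lastRow := PySem.List.pyGetD st.1 (-1) []
  let mc := (PySem.List.enumerate lastRow 0).foldl
      (fun (acc : Int × Int) p => if p.2 ≤ acc.1 then (p.2, p.1) else acc) (max_cost, n)
  let coupons_left := mc.2
  let bt := lunchesBT st.2 n.toNat coupons_left ([], 0)
  ((PySem.List.min? lastRow (fun v => v)).getD 0, coupons_left, bt.2,
   (PySem.List.slice? bt.1 none none (-1)).getD [])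

-- ===== PORT B =====
-- B-side helper: the body of the `for i in range(1, n + 1)` row loop, verbatim
def lunchesRow (n : Int) (cost : List Int)
    (rows : List (List (Int × List Int))) (i : Int) : List (List (Int × List Int)) :=
  let max_cost : Int := 1000000
  let prow := PySem.List.pyGetD rows (i-1) []
  let ci := PySem.List.pyGetD cost i 0
  let newRow := (PySem.List.pyRange 0 (n+1) 1).map (fun j =>
    let fcp : Int × List Int :=
      if j < n then
        ((PySem.List.pyGetD prow (j+1) (0,[])).1, (PySem.List.pyGetD prow (j+1) (0,[])).2 ++ [i])
      else (max_cost, [])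
    let src := if ci > 100 then j - 1 else j
    let fm := (PySem.List.pyGetD prow src (0,[])).1 + ci
    if fcp.1 < fm then fcp else (fm, (PySem.List.pyGetD prow src (0,[])).2))
  rows ++ [newRow]

def lunches_alt (n : Int) (cost : List Int) : Int × Int × Int × List Int :=
  let max_cost : Int := 1000000
  let row0 : List (Int × List Int) :=
    ((0:Int), ([] : List Int)) :: (PySem.List.pyRange 0 n 1).map (fun _ => (max_cost, ([] : List Int)))
  let rows := (PySem.List.pyRange 1 (n+1) 1).foldl (lunchesRow n cost) [row0]
  let last := PySem.List.pyGetD rows n []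
  let vals := last.map (fun p => p.1)
  let best := (PySem.List.min? vals (fun v => v)).getD 0
  let coupons_left : Int :=
    n - (((PySem.List.index? ((PySem.List.slice? vals none none (-1)).getD []) best).getD 0 : Nat) : Int)
  let days := (PySem.List.pyGetD last coupons_left ((0:Int), ([] : List Int))).2
  (best, coupons_left, (days.length : Int), days)

-- ===== PRECONDITION & SPEC =====
-- Pre_ restricts to the problem's natural domain (day count in range, nonnegative lunch costs
-- totalling less than the 10**6 sentinel): outside it A raises IndexError on some inputs and on
-- others returns coupon-day lists contaminated by sentinel states, which B does not reproduce.
def Pre_lunches (n : Int) (cost : List Int) : Prop :=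
  0 ≤ n ∧ (n = 0 ∨ n < (cost.length : Int)) ∧
  (∀ x ∈ (cost.drop 1).take n.toNat, 0 ≤ x) ∧ ((cost.drop 1).take n.toNat).sum < 1000000
instance (n : Int) (cost : List Int) : Decidable (Pre_lunches n cost) := by
  unfold Pre_lunches; infer_instance
def pvWitness_lunches : Int × List Int := (2, [0, 101, 50])

def Spec_lunches (n : Int) (cost : List Int) (out : Int × Int × Int × List Int) : Prop := out = lunches_alt n cost
instance (n : Int) (cost : List Int) (out : Int × Int × Int × List Int) : Decidable (Spec_lunches n cost out) := by unfold Spec_lunches; infer_instance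

-- ===== CLAIM (what is proved, stated in full; the proofs are below) =====
def Claim_equal_lunches : Prop := ∀ (n : Int) (cost : List Int), Dom_lunches n cost → Pre_lunches n cost → Spec_lunches n cost (lunches n cost)

-- ===== LEMMAS AND PROOFS =====

abbrev pvMax : Int := 1000000

-- Python-indexing helpers reduced to plain list operations
theorem pv_getD_set_self {α : Type} (xs : List α) (a : Nat) (v d : α) (h : a < xs.length) :
    (xs.set a v).getD a d = v := by
  simp [List.getD, h]

theorem pv_getD_set_ne {α : Type} (xs : List α) (a b : Nat) (v d : α) (h : a ≠ b) :
    (xs.set a v).getD b d = xs.getD b d := by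
  simp [List.getD, List.getElem?_set_ne h]

theorem pv_set_getD_self {α : Type} (xs : List α) (a : Nat) (d : α) (h : a < xs.length) :
    xs.set a (xs.getD a d) = xs := by
  rw [List.getD_eq_getElem _ _ h, List.set_getElem_self]

theorem pv_take_set_succ {α : Type} (xs : List α) (m : Nat) (v : α) (h : m < xs.length) :
    (xs.set m v).take (m+1) = xs.take m ++ [v] := by
  apply List.ext_getElem
  · simp [List.length_take]; omega
  · intro i hi1 hi2
    simp only [List.getElem_take, List.getElem_set]
    by_cases him : i = m
    · subst him
      have hle : (List.take i xs).length ≤ i := by simp [List.length_take]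
      rw [List.getElem_append_right hle]
      simp [List.length_take, Nat.min_eq_left (Nat.le_of_lt h)]
    · have him' : i < m := by simp [List.length_take] at hi2; omega
      have hlt : i < (List.take m xs).length := by simp [List.length_take]; omega
      rw [List.getElem_append_left hlt]
      simp only [List.getElem_take]
      rw [if_neg (fun he => him he.symm)]

theorem pv_pr_map {α : Type} (b : Int) (f : Int → α) :
    (PySem.List.pyRange 0 b 1).map f = (List.range b.toNat).map (fun (k : Nat) => f (k : Int)) := by
  rw [PySem.List.pyRange_one, List.map_map]
  have h : b - 0 = b := by ring
  rw [h]
  apply List.map_congr_left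
  intro a _
  simp

-- B's per-cell step (value, coupon-day list), as a function of the previous row
def pvCellB (N : Nat) (cost : List Int) (prow : List (Int × List Int)) (i j : Int) : Int × List Int :=
  let ci := PySem.List.pyGetD cost i 0
  let fcp : Int × List Int :=
    if j < (N : Int) then
      ((PySem.List.pyGetD prow (j+1) (0,[])).1, (PySem.List.pyGetD prow (j+1) (0,[])).2 ++ [i])
    else (pvMax, [])
  let src := if ci > 100 then j - 1 else j
  let fm := (PySem.List.pyGetD prow src (0,[])).1 + ci
  if fcp.1 < fm then fcp else (fm, (PySem.List.pyGetD prow src (0,[])).2)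

-- A's per-cell prev entry (pointer, flag), as a function of the previous row
def pvCellP (N : Nat) (cost : List Int) (prow : List (Int × List Int)) (i j : Int) : Int × Int :=
  let ci := PySem.List.pyGetD cost i 0
  let fc := if j < (N : Int) then (PySem.List.pyGetD prow (j+1) (0,[])).1 else pvMax
  if ci > 100 then
    (if fc < (PySem.List.pyGetD prow (j-1) (0,[])).1 + ci then (j+1, -1) else (j-1, 1))
  else
    (if fc < (PySem.List.pyGetD prow j (0,[])).1 + ci then (j+1, -1) else (j, 0))

def pvRowB (N : Nat) (cost : List Int) : Nat → List (Int × List Int)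
  | 0 => (0, []) :: (List.range N).map (fun _ => (pvMax, []))
  | i+1 => (List.range (N+1)).map (fun (k : Nat) => pvCellB N cost (pvRowB N cost i) ((i : Int)+1) (k : Int))

def pvCell (N : Nat) (cost : List Int) (i j : Nat) : Int × List Int :=
  (pvRowB N cost i).getD j (0,[])

def pvPrevRow (N : Nat) (cost : List Int) (i : Nat) : List (Int × Int) :=
  if i = 0 then (List.range (N+1)).map (fun _ => (0,0))
  else (List.range (N+1)).map (fun (k : Nat) => pvCellP N cost (pvRowB N cost (i-1)) (i : Int) (k : Int))

def pvDpState (N : Nat) (cost : List Int) (t : Nat) : List (List Int) :=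
  (List.range (N+1)).map (fun i =>
    if i ≤ t then (pvRowB N cost i).map Prod.fst else (List.range (N+1)).map (fun _ => pvMax))

def pvPrevState (N : Nat) (cost : List Int) (t : Nat) : List (List (Int × Int)) :=
  (List.range (N+1)).map (fun i => if i ≤ t then pvPrevRow N cost i else pvPrevRow N cost 0)

theorem pvRowB_length (N : Nat) (cost : List Int) (i : Nat) : (pvRowB N cost i).length = N + 1 := by
  cases i <;> simp [pvRowB]

theorem pv_stepA_eval (N : Nat) (cost : List Int) (i : Nat)
    (dp : List (List Int)) (prev : List (List (Int × Int)))
    (hrowprev : PySem.List.pyGetD dp ((i : Int) - 1) [] = (pvRowB N cost (i-1)).map Prod.fst)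
    (j : Int) :
    lunchesStep ((N : Nat) : Int) cost (i : Int) (dp, prev) j
    = (PySem.List.pySetD dp (i : Int) (PySem.List.pySetD (PySem.List.pyGetD dp (i : Int) []) j
         (pvCellB N cost (pvRowB N cost (i-1)) (i : Int) j).1),
       PySem.List.pySetD prev (i : Int) (PySem.List.pySetD (PySem.List.pyGetD prev (i : Int) []) j
         (pvCellP N cost (pvRowB N cost (i-1)) (i : Int) j))) := by
  have hmap : ∀ a : Int, PySem.List.pyGetD ((pvRowB N cost (i-1)).map Prod.fst) a 0
      = (PySem.List.pyGetD (pvRowB N cost (i-1)) a ((0 : Int), ([] : List Int))).1 :=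
    fun a => PySem.List.pyGetD_map Prod.fst _ a ((0 : Int), ([] : List Int))
  simp only [lunchesStep, pvCellB, pvCellP, hrowprev, hmap]
  by_cases hci : PySem.List.pyGetD cost (i : Int) 0 > 100 <;>
    by_cases hj : j < (N : Int) <;>
      simp only [hci, hj, if_true, if_false] <;>
        split_ifs <;> simp_all

-- A's inner j-loop
theorem pv_innerA (N : Nat) (cost : List Int) (i : Nat) (hi1 : 1 ≤ i) (hiN : i ≤ N) :
    ∀ (d m : Nat), m + d = N + 1 →
    ∀ (dp : List (List Int)) (prev : List (List (Int × Int))),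
      dp.length = N + 1 → prev.length = N + 1 →
      PySem.List.pyGetD dp ((i : Int) - 1) [] = (pvRowB N cost (i-1)).map Prod.fst →
      (PySem.List.pyGetD dp (i : Int) []).length = N + 1 →
      (PySem.List.pyGetD prev (i : Int) []).length = N + 1 →
      (PySem.List.pyRange (m : Int) ((N : Int)+1) 1).foldl (lunchesStep ((N : Nat) : Int) cost (i : Int)) (dp, prev)
      = (PySem.List.pySetD dp (i : Int)
           ((PySem.List.pyGetD dp (i : Int) []).take m ++
            (List.range' m d).map (fun (k : Nat) => (pvCellB N cost (pvRowB N cost (i-1)) (i : Int) (k : Int)).1)),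
         PySem.List.pySetD prev (i : Int)
           ((PySem.List.pyGetD prev (i : Int) []).take m ++
            (List.range' m d).map (fun (k : Nat) => pvCellP N cost (pvRowB N cost (i-1)) (i : Int) (k : Int)))) := by
  intro d
  induction d with
  | zero =>
    intro m hm dp prev hdl hpl hrow hrl hprl
    have hge : ((N : Int)+1) ≤ (m : Int) := by exact_mod_cast (show N + 1 ≤ m by omega)
    rw [PySem.List.pyRange_one_eq_nil hge]
    simp only [List.foldl_nil, List.range', List.map_nil, List.append_nil]
    have hm' : m = N + 1 := by omega
    subst hm'
    rw [List.take_of_length_le (Nat.le_of_eq hrl), List.take_of_length_le (Nat.le_of_eq hprl)]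
    rw [PySem.List.pySetD_natCast, PySem.List.pySetD_natCast,
        PySem.List.pyGetD_natCast, PySem.List.pyGetD_natCast]
    rw [pv_set_getD_self dp i [] (by omega), pv_set_getD_self prev i [] (by omega)]
  | succ d ih =>
    intro m hm dp prev hdl hpl hrow hrl hprl
    have hmN : m ≤ N := by omega
    have hlt : (m : Int) < (N : Int)+1 := by exact_mod_cast (show m < N + 1 by omega)
    rw [PySem.List.pyRange_one_cons hlt, List.foldl_cons, pv_stepA_eval N cost i dp prev hrow]
    have hcast : (m : Int) + 1 = ((m+1 : Nat) : Int) := by push_cast; ring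
    rw [hcast]
    -- names for the written cell values
    set v := (pvCellB N cost (pvRowB N cost (i-1)) (i : Int) ((m : Nat) : Int)).1 with hv
    set p := pvCellP N cost (pvRowB N cost (i-1)) (i : Int) ((m : Nat) : Int) with hp
    have hiil : ((i : Int) - 1) = ((i - 1 : Nat) : Int) := by omega
    -- the updated tables
    rw [PySem.List.pySetD_natCast dp i, PySem.List.pySetD_natCast prev i,
        PySem.List.pySetD_natCast _ m, PySem.List.pySetD_natCast _ m,
        PySem.List.pyGetD_natCast dp i, PySem.List.pyGetD_natCast prev i]
    have hidp : i < dp.length := by omega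
    have hiprev : i < prev.length := by omega
    have hrl' : (dp.getD i []).length = N + 1 := by
      rw [← PySem.List.pyGetD_natCast dp i]; exact hrl
    have hprl' : (prev.getD i []).length = N + 1 := by
      rw [← PySem.List.pyGetD_natCast prev i]; exact hprl
    rw [ih (m+1) (by omega) _ _ (by simpa using hdl) (by simpa using hpl)
        (by rw [hiil, PySem.List.pyGetD_natCast, pv_getD_set_ne _ _ _ _ _ (by omega : i ≠ i - 1)]
            rw [← PySem.List.pyGetD_natCast dp (i-1), ← hiil]; exact hrow)
        (by rw [PySem.List.pyGetD_natCast, pv_getD_set_self _ _ _ _ hidp]; simpa using hrl')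
        (by rw [PySem.List.pyGetD_natCast, pv_getD_set_self _ _ _ _ hiprev]; simpa using hprl')]
    rw [PySem.List.pySetD_natCast, PySem.List.pySetD_natCast,
        PySem.List.pyGetD_natCast, PySem.List.pyGetD_natCast,
        pv_getD_set_self _ _ _ _ hidp, pv_getD_set_self _ _ _ _ hiprev,
        List.set_set, List.set_set]
    have hmrow : m < (dp.getD i []).length := by omega
    have hmprow : m < (prev.getD i []).length := by omega
    rw [pv_take_set_succ _ _ _ hmrow, pv_take_set_succ _ _ _ hmprow]
    have hr' : List.range' m (d+1) = m :: List.range' (m+1) d := List.range'_succ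
    rw [hr', List.map_cons, List.map_cons]
    simp only [List.append_assoc, List.singleton_append, Prod.mk.injEq,
      PySem.List.pySetD_natCast]
    exact ⟨rfl, rfl⟩

theorem pv_getD_map_range {α : Type} (n k : Nat) (f : Nat → α) (d : α) (h : k < n) :
    ((List.range n).map f).getD k d = f k := by
  rw [List.getD_eq_getElem _ _ (by simpa using h)]
  simp

theorem pvPrevRow_length (N : Nat) (cost : List Int) (i : Nat) :
    (pvPrevRow N cost i).length = N + 1 := by
  unfold pvPrevRow; split <;> simp

theorem pv_rowB_succ_map_fst (N : Nat) (cost : List Int) (t : Nat) :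
    (pvRowB N cost (t+1)).map Prod.fst
    = (List.range (N+1)).map (fun (k : Nat) => (pvCellB N cost (pvRowB N cost t) ((t : Int)+1) (k : Int)).1) := by
  rw [show pvRowB N cost (t+1)
      = (List.range (N+1)).map (fun (k : Nat) => pvCellB N cost (pvRowB N cost t) ((t : Int)+1) (k : Int)) from rfl]
  rw [List.map_map]
  rfl

-- initial tables of A (after dp[0][0] = 0) are the t = 0 states
theorem pv_initA_dp (N : Nat) (cost : List Int) :
    PySem.List.pySetD
      ((PySem.List.pyRange 0 ((N : Int)+1) 1).map (fun _ => (PySem.List.pyRange 0 ((N : Int)+1) 1).map (fun _ => pvMax)))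
      0
      (PySem.List.pySetD
        (PySem.List.pyGetD
          ((PySem.List.pyRange 0 ((N : Int)+1) 1).map (fun _ => (PySem.List.pyRange 0 ((N : Int)+1) 1).map (fun _ => pvMax)))
          0 []) 0 0)
    = pvDpState N cost 0 := by
  have ht : ((N : Int)+1).toNat = N + 1 := by omega
  rw [pv_pr_map ((N : Int)+1) (fun _ => (PySem.List.pyRange 0 ((N : Int)+1) 1).map (fun _ => pvMax))]
  rw [pv_pr_map ((N : Int)+1) (fun _ => pvMax), ht]
  rw [show (0 : Int) = ((0 : Nat) : Int) from rfl, PySem.List.pySetD_natCast, PySem.List.pySetD_natCast,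
      PySem.List.pyGetD_natCast]
  rw [pv_getD_map_range (N+1) 0 _ [] (by omega)]
  apply List.ext_getElem
  · simp [pvDpState]
  · intro a ha1 ha2
    simp only [List.getElem_set, pvDpState, List.getElem_map, List.getElem_range]
    have haN : a < N + 1 := by simpa using ha1
    by_cases ha0 : a = 0
    · subst ha0
      simp only [if_true, Nat.le_refl]
      apply List.ext_getElem
      · simp [pvRowB]
      · intro b hb1 hb2
        have hbN : b < N + 1 := by simpa using hb1
        by_cases hb0 : b = 0
        · subst hb0; simp [pvRowB]
        · obtain ⟨b', rfl⟩ : ∃ b', b = b' + 1 := ⟨b - 1, by omega⟩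
          simp [pvRowB, List.getElem_set, List.getElem_map, List.getElem_range]
    · rw [if_neg (show ¬ (0 = a) by omega), if_neg (by omega : ¬ a ≤ 0)]

theorem pv_initA_prev (N : Nat) (cost : List Int) :
    ((PySem.List.pyRange 0 ((N : Int)+1) 1).map
      (fun _ => (PySem.List.pyRange 0 ((N : Int)+1) 1).map (fun _ => ((0 : Int), (0 : Int)))))
    = pvPrevState N cost 0 := by
  have ht : ((N : Int)+1).toNat = N + 1 := by omega
  rw [pv_pr_map ((N : Int)+1) (fun _ => (PySem.List.pyRange 0 ((N : Int)+1) 1).map (fun _ => ((0 : Int), (0 : Int))))]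
  rw [pv_pr_map ((N : Int)+1) (fun _ => ((0 : Int), (0 : Int))), ht]
  apply List.ext_getElem
  · simp [pvPrevState]
  · intro a ha1 ha2
    simp only [pvPrevState, List.getElem_map, List.getElem_range]
    have haN : a < N + 1 := by simpa using ha1
    split <;> simp [pvPrevRow]
    omega

-- A's outer i-loop
theorem pv_outerA (N : Nat) (cost : List Int) :
    ∀ (t : Nat), t ≤ N →
    (PySem.List.pyRange 1 ((t : Int)+1) 1).foldl
      (fun st (i : Int) => (PySem.List.pyRange 0 ((N : Int)+1) 1).foldl (lunchesStep ((N : Nat) : Int) cost i) st)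
      (pvDpState N cost 0, pvPrevState N cost 0)
    = (pvDpState N cost t, pvPrevState N cost t) := by
  intro t
  induction t with
  | zero =>
    intro _
    have h0 : ((0:Nat):Int) + 1 ≤ 1 := by norm_num
    rw [PySem.List.pyRange_one_eq_nil h0]
    rfl
  | succ t ih =>
    intro ht
    have h1 : (1 : Int) ≤ (t : Int) + 1 := by omega
    have hc : ((t+1 : Nat) : Int) + 1 = ((t : Int) + 1) + 1 := by push_cast; ring
    rw [hc, PySem.List.pyRange_one_succ_right h1, List.foldl_append, ih (by omega)]
    simp only [List.foldl_cons, List.foldl_nil]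
    have hcast : (t : Int) + 1 = ((t+1 : Nat) : Int) := by push_cast; ring
    rw [hcast]
    have hlen_dp : (pvDpState N cost t).length = N + 1 := by simp [pvDpState]
    have hlen_prev : (pvPrevState N cost t).length = N + 1 := by simp [pvPrevState]
    have hrow : PySem.List.pyGetD (pvDpState N cost t) (((t+1 : Nat) : Int) - 1) []
        = (pvRowB N cost ((t+1) - 1)).map Prod.fst := by
      rw [show (((t+1 : Nat) : Int) - 1) = ((t : Nat) : Int) by push_cast; ring, PySem.List.pyGetD_natCast]
      unfold pvDpState
      rw [pv_getD_map_range (N+1) t _ [] (by omega)]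
      simp
    have hrl : (PySem.List.pyGetD (pvDpState N cost t) ((t+1 : Nat) : Int) []).length = N + 1 := by
      rw [PySem.List.pyGetD_natCast]
      unfold pvDpState
      rw [pv_getD_map_range (N+1) (t+1) _ [] (by omega)]
      split <;> simp [pvRowB_length]
    have hprl : (PySem.List.pyGetD (pvPrevState N cost t) ((t+1 : Nat) : Int) []).length = N + 1 := by
      rw [PySem.List.pyGetD_natCast]
      unfold pvPrevState
      rw [pv_getD_map_range (N+1) (t+1) _ [] (by omega)]
      split <;> simp [pvPrevRow_length]
    have hinner := pv_innerA N cost (t+1) (by omega) (by omega) (N+1) 0 (by omega)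
        (pvDpState N cost t) (pvPrevState N cost t) hlen_dp hlen_prev hrow hrl hprl
    simp only [Nat.cast_zero] at hinner
    rw [hinner]
    rw [List.take_zero, List.take_zero, List.nil_append, List.nil_append,
        PySem.List.pySetD_natCast, PySem.List.pySetD_natCast]
    have hrange : List.range' 0 (N+1) = List.range (N+1) := List.range_eq_range'.symm
    rw [hrange]
    have hfst := pv_rowB_succ_map_fst N cost t
    simp only [Prod.mk.injEq]
    constructor
    · apply List.ext_getElem
      · simp [pvDpState]
      · intro a ha1 ha2
        have haN : a < N + 1 := by simp [pvDpState] at ha2; omega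
        rw [List.getElem_set]
        by_cases hat : a = t + 1
        · subst hat
          rw [if_pos rfl]
          simp only [pvDpState, List.getElem_map, List.getElem_range, if_pos (Nat.le_refl _)]
          rw [hfst]
          simp
        · rw [if_neg (fun h => hat h.symm)]
          simp only [pvDpState, List.getElem_map, List.getElem_range]
          rw [if_congr (show (a ≤ t ↔ a ≤ t + 1) by omega) rfl rfl]
    · apply List.ext_getElem
      · simp [pvPrevState, pvPrevRow_length]
      · intro a ha1 ha2
        have haN : a < N + 1 := by simp [pvPrevState] at ha2; omega
        rw [List.getElem_set]
        by_cases hat : a = t + 1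
        · subst hat
          rw [if_pos rfl]
          simp only [pvPrevState, List.getElem_map, List.getElem_range, if_pos (Nat.le_refl _)]
          rw [show pvPrevRow N cost (t+1)
              = (List.range (N+1)).map (fun (k : Nat) => pvCellP N cost (pvRowB N cost t) ((t+1 : Nat) : Int) (k : Int)) by
            unfold pvPrevRow; rw [if_neg (by omega)]; simp]
          simp
        · rw [if_neg (fun h => hat h.symm)]
          simp only [pvPrevState, List.getElem_map, List.getElem_range]
          rw [if_congr (show (a ≤ t ↔ a ≤ t + 1) by omega) rfl rfl]

theorem pv_row0 (N : Nat) (cost : List Int) :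
    ((0 : Int), ([] : List Int)) :: (PySem.List.pyRange 0 (N : Int) 1).map (fun _ => (pvMax, ([] : List Int)))
    = pvRowB N cost 0 := by
  rw [pv_pr_map (N : Int) (fun _ => (pvMax, ([] : List Int)))]
  have ht : ((N : Int)).toNat = N := by omega
  rw [ht]
  rfl

theorem pv_rowsB (N : Nat) (cost : List Int) :
    ∀ (t : Nat), t ≤ N →
    (PySem.List.pyRange 1 ((t : Int)+1) 1).foldl (lunchesRow ((N : Nat) : Int) cost) [pvRowB N cost 0]
    = (List.range (t+1)).map (pvRowB N cost) := by
  intro t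
  induction t with
  | zero =>
    intro _
    have h0 : ((0:Nat):Int) + 1 ≤ 1 := by norm_num
    rw [PySem.List.pyRange_one_eq_nil h0]
    simp
  | succ t ih =>
    intro ht
    have h1 : (1 : Int) ≤ (t : Int) + 1 := by omega
    have hc : ((t+1 : Nat) : Int) + 1 = ((t : Int) + 1) + 1 := by push_cast; ring
    rw [hc, PySem.List.pyRange_one_succ_right h1, List.foldl_append, ih (by omega)]
    simp only [List.foldl_cons, List.foldl_nil]
    show lunchesRow ((N : Nat) : Int) cost ((List.range (t+1)).map (pvRowB N cost)) ((t : Int) + 1)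
        = (List.range (t+1+1)).map (pvRowB N cost)
    unfold lunchesRow
    simp only []
    have hprow : PySem.List.pyGetD ((List.range (t+1)).map (pvRowB N cost)) (((t : Int) + 1) - 1) []
        = pvRowB N cost t := by
      rw [show ((t : Int) + 1) - 1 = ((t : Nat) : Int) by ring, PySem.List.pyGetD_natCast]
      exact pv_getD_map_range (t+1) t _ [] (by omega)
    rw [hprow]
    rw [List.range_succ (n := t+1), List.map_append, List.map_singleton]
    congr 1
    rw [pv_pr_map ((N : Int) + 1) _]
    have ht2 : ((N : Int)+1).toNat = N + 1 := by omega
    rw [ht2]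
    rfl

-- one Python-scan lemma: A's `<=`-update scan computes (min, last index of the min)
theorem pv_scan (z : Int) :
    ∀ (xs : List Int), xs ≠ [] → (∀ v ∈ xs, v ≤ pvMax) →
    (PySem.List.enumerate xs 0).foldl
      (fun (acc : Int × Int) p => if p.2 ≤ acc.1 then (p.2, p.1) else acc) (pvMax, z)
    = ((PySem.List.min? xs (fun v => v)).getD 0,
       ((xs.length - 1 - ((PySem.List.index? xs.reverse ((PySem.List.min? xs (fun v => v)).getD 0)).getD 0) : Nat) : Int)) := by
  intro xs
  induction xs using List.reverseRecOn with
  | nil => intro h; exact absurd rfl h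
  | append_singleton ys x ih =>
    intro _ hb
    rw [PySem.List.enumerate_append, List.foldl_append]
    cases ys with
    | nil =>
      simp only [PySem.List.enumerate_nil, List.foldl_nil, List.nil_append,
        List.length_nil, Nat.cast_zero, add_zero]
      rw [show PySem.List.enumerate [x] 0 = [((0:Int), x)] by
        simp [PySem.List.enumerate_cons, PySem.List.enumerate_nil]]
      simp only [List.foldl_cons, List.foldl_nil]
      rw [if_pos (hb x (by simp))]
      rw [PySem.List.min?_id_cons x []]
      simp [PySem.List.index?_cons_self]
    | cons y t =>
      have hys : (y :: t) ≠ [] := by simp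
      have hball : ∀ v ∈ y :: t, v ≤ pvMax := by
        intro v hv; apply hb; simp at hv ⊢; tauto
      rw [ih hys hball]
      rw [show PySem.List.enumerate [x] (0 + ((y :: t).length : Int)) = [(((y :: t).length : Int), x)] by
        simp [PySem.List.enumerate_cons, PySem.List.enumerate_nil]]
      simp only [List.foldl_cons, List.foldl_nil]
      set m := List.foldl min y t with hmdef
      have hminys : (PySem.List.min? (y :: t) fun v => v) = some m := PySem.List.min?_id_cons y t
      have hminapp : (PySem.List.min? (y :: t ++ [x]) fun v => v) = some (min m x) := by
        rw [show (y :: t ++ [x]) = y :: (t ++ [x]) from rfl, PySem.List.min?_id_cons]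
        rw [List.foldl_append]
        simp [hmdef]
      have hrev : (y :: t ++ [x]).reverse = x :: (y :: t).reverse := by simp
      rw [hminys, hminapp, hrev]
      simp only [Option.getD_some]
      by_cases hx : x ≤ m
      · rw [if_pos hx]
        have hminx : min m x = x := by omega
        rw [hminx, PySem.List.index?_cons_self]
        simp only [Option.getD_some, Nat.sub_zero, Prod.mk.injEq]
        constructor
        · trivial
        · simp
      · rw [if_neg hx]
        have hminx : min m x = m := by omega
        rw [hminx]
        have hne : x ≠ m := by omega
        rw [PySem.List.index?_cons_of_ne _ hne]
        have hmemyt : m ∈ y :: t := by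
          rcases PySem.List.foldl_min_mem t y with h | h
          · rw [hmdef, h]; simp
          · rw [hmdef]; simp only [List.mem_cons]; right; exact h
        have hmem : m ∈ (y :: t).reverse := by rwa [List.mem_reverse]
        obtain ⟨k, hk⟩ := Option.isSome_iff_exists.mp ((PySem.List.index?_isSome_iff _ _).mpr hmem)
        rw [hk]
        obtain ⟨hklen, -, -⟩ := PySem.List.getElem_of_index?_eq_some hk
        simp only [Option.map_some, Option.getD_some, Prod.mk.injEq]
        constructor
        · trivial
        · simp only [List.length_append, List.length_cons, List.length_reverse,
            List.length_nil] at hklen ⊢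
          omega

-- canonical cell reads
def pvCI (cost : List Int) (k : Nat) : Int := cost.getD k 0
def pvSRC (N : Nat) (cost : List Int) (k j : Nat) : Nat :=
  if pvCI cost k > 100 then (if j = 0 then N else j - 1) else j
def pvFC (N : Nat) (cost : List Int) (i j : Nat) : Int :=
  if j < N then (pvCell N cost i (j+1)).1 else pvMax
def pvFM (N : Nat) (cost : List Int) (i k j : Nat) : Int :=
  (pvCell N cost i (pvSRC N cost k j)).1 + pvCI cost k

theorem pv_cell_succ (N : Nat) (cost : List Int) (i j : Nat) (hj : j ≤ N) :
    pvCell N cost (i+1) j = pvCellB N cost (pvRowB N cost i) ((i : Int)+1) (j : Int) := by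
  unfold pvCell
  rw [show pvRowB N cost (i+1)
      = (List.range (N+1)).map (fun (k : Nat) => pvCellB N cost (pvRowB N cost i) ((i : Int)+1) (k : Int)) from rfl]
  exact pv_getD_map_range (N+1) j _ _ (by omega)

theorem pv_read_plus (N : Nat) (cost : List Int) (i j : Nat) (hj : j < N) :
    PySem.List.pyGetD (pvRowB N cost i) ((j : Int) + 1) (0,[]) = pvCell N cost i (j+1) := by
  rw [show ((j : Int) + 1) = ((j+1 : Nat) : Int) by push_cast; ring, PySem.List.pyGetD_natCast]
  rfl

theorem pv_read_at (N : Nat) (cost : List Int) (i j : Nat) :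
    PySem.List.pyGetD (pvRowB N cost i) (j : Int) (0,[]) = pvCell N cost i j := by
  rw [PySem.List.pyGetD_natCast]; rfl

theorem pv_read_minus (N : Nat) (cost : List Int) (i j : Nat) (hj : j ≤ N) :
    PySem.List.pyGetD (pvRowB N cost i) ((j : Int) - 1) (0,[])
    = pvCell N cost i (if j = 0 then N else j - 1) := by
  by_cases hj0 : j = 0
  · subst hj0
    have hne : pvRowB N cost i ≠ [] := by
      intro h
      have := pvRowB_length N cost i
      rw [h] at this
      simp at this
    rw [if_pos rfl]
    rw [show ((0 : Nat) : Int) - 1 = (-1 : Int) by norm_num,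
        PySem.List.pyGetD_neg_one _ _ hne]
    rw [List.getLast_eq_getElem hne]
    unfold pvCell
    rw [List.getD_eq_getElem _ _ (by rw [pvRowB_length]; omega)]
    have hidx : (pvRowB N cost i).length - 1 = N := by simp [pvRowB_length]
    simp only [hidx]
  · rw [show ((j : Nat) : Int) - 1 = ((j - 1 : Nat) : Int) by omega, PySem.List.pyGetD_natCast]
    rw [if_neg hj0]
    rfl

theorem pv_cell_eval (N : Nat) (cost : List Int) (i j : Nat) (hj : j ≤ N) :
    pvCell N cost (i+1) j
    = (if pvFC N cost i j < pvFM N cost i (i+1) j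
       then (pvFC N cost i j, if j < N then (pvCell N cost i (j+1)).2 ++ [((i : Int)+1)] else [])
       else (pvFM N cost i (i+1) j, (pvCell N cost i (pvSRC N cost (i+1) j)).2)) := by
  rw [pv_cell_succ N cost i j hj]
  unfold pvCellB
  rw [show PySem.List.pyGetD cost ((i : Int)+1) 0 = cost.getD (i+1) 0 by
    rw [show ((i : Int) + 1) = ((i+1 : Nat) : Int) by push_cast; ring, PySem.List.pyGetD_natCast]]
  unfold pvFC pvFM pvSRC pvCI
  by_cases hci : cost.getD (i+1) 0 > 100 <;>
    by_cases hjN : j < N <;>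
      simp only [hci, hjN, if_pos, if_neg, if_true, if_false, ite_true, ite_false,
        (show ((j : Int) < (N : Int)) = (j < N) by simp), decide_true, decide_false,
        pv_read_plus N cost i j, pv_read_minus N cost i j hj, pv_read_at N cost i j] <;>
      first
        | rfl
        | (rw [pv_read_minus N cost i j hj]; rfl)
        | (rw [pv_read_plus N cost i j hjN]; rfl)
        | (rw [pv_read_plus N cost i j hjN, pv_read_minus N cost i j hj]; rfl)
        | (rw [pv_read_at N cost i j]; rfl)
        | (rw [pv_read_plus N cost i j hjN, pv_read_at N cost i j]; rfl)

theorem pv_prev_entry (N : Nat) (cost : List Int) (i j : Nat) (hj : j ≤ N) :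
    PySem.List.pyGetD (pvPrevRow N cost (i+1)) (j : Int) ((0 : Int), (0 : Int))
    = (if pvFC N cost i j < pvFM N cost i (i+1) j
       then ((j : Int) + 1, -1)
       else (if pvCI cost (i+1) > 100 then ((j : Int) - 1, 1) else ((j : Int), 0))) := by
  rw [show pvPrevRow N cost (i+1)
      = (List.range (N+1)).map (fun (k : Nat) => pvCellP N cost (pvRowB N cost i) ((i+1 : Nat) : Int) (k : Int)) by
    unfold pvPrevRow; rw [if_neg (by omega)]; simp]
  rw [PySem.List.pyGetD_natCast, pv_getD_map_range (N+1) j _ _ (by omega)]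
  unfold pvCellP pvFC pvFM pvSRC pvCI
  rw [show PySem.List.pyGetD cost ((i+1 : Nat) : Int) 0 = cost.getD (i+1) 0 from
    PySem.List.pyGetD_natCast cost (i+1) 0]
  by_cases hci : cost.getD (i+1) 0 > 100 <;>
    by_cases hjN : j < N <;>
      simp only [hci, hjN, (show ((j : Int) < (N : Int)) = (j < N) by simp),
        if_true, if_false, decide_true, decide_false,
        pv_read_plus N cost i j, pv_read_minus N cost i j hj, pv_read_at N cost i j] <;>
      first
        | rfl
        | (rw [pv_read_minus N cost i j hj]; rfl)
        | (rw [pv_read_plus N cost i j hjN]; rfl)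
        | (rw [pv_read_plus N cost i j hjN, pv_read_minus N cost i j hj]; rfl)
        | (rw [pv_read_at N cost i j]; rfl)
        | (rw [pv_read_plus N cost i j hjN, pv_read_at N cost i j]; rfl)

-- row 0 cells
theorem pv_cell_zero (N : Nat) (cost : List Int) (j : Nat) (hj : j ≤ N) :
    pvCell N cost 0 j = if j = 0 then ((0 : Int), ([] : List Int)) else (pvMax, []) := by
  unfold pvCell pvRowB
  by_cases hj0 : j = 0
  · subst hj0; simp
  · obtain ⟨j', rfl⟩ : ∃ j', j = j' + 1 := ⟨j - 1, by omega⟩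
    rw [if_neg hj0]
    rw [List.getD_eq_getElem _ _ (by simp; omega)]
    simp

-- every dp value is at most the sentinel
theorem pv_val_le (N : Nat) (cost : List Int) :
    ∀ (i : Nat), ∀ j ≤ N, (pvCell N cost i j).1 ≤ pvMax := by
  intro i
  induction i with
  | zero =>
    intro j hj
    rw [pv_cell_zero N cost j hj]
    split <;> simp [pvMax]
  | succ i ih =>
    intro j hj
    rw [pv_cell_eval N cost i j hj]
    have hfc : pvFC N cost i j ≤ pvMax := by
      unfold pvFC
      split
      · exact ih (j+1) (by omega)
      · exact le_refl _
    by_cases hbr : pvFC N cost i j < pvFM N cost i (i+1) j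
    · rw [if_pos hbr]; exact hfc
    · rw [if_neg hbr]
      show pvFM N cost i (i+1) j ≤ pvMax
      omega

-- cells right of the diagonal hold the sentinel (natural-domain costs)
theorem pv_val_diag (N : Nat) (cost : List Int)
    (hcost : ∀ k, 1 ≤ k → k ≤ N → 0 ≤ cost.getD k 0) :
    ∀ (i : Nat), i ≤ N → ∀ j ≤ N, i < j → (pvCell N cost i j).1 = pvMax := by
  intro i
  induction i with
  | zero =>
    intro _ j hj hij
    rw [pv_cell_zero N cost j hj, if_neg (by omega)]
  | succ i ih =>
    intro hiN j hj hij
    have hci : 0 ≤ pvCI cost (i+1) := hcost (i+1) (by omega) (by omega)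
    rw [pv_cell_eval N cost i j hj]
    have hfc : pvFC N cost i j = pvMax := by
      unfold pvFC
      split
      · exact ih (by omega) (j+1) (by omega) (by omega)
      · rfl
    have hsrc1 : i < pvSRC N cost (i+1) j := by
      unfold pvSRC; split_ifs <;> omega
    have hsrc2 : pvSRC N cost (i+1) j ≤ N := by
      unfold pvSRC; split_ifs <;> omega
    have hfm : pvFM N cost i (i+1) j = pvMax + pvCI cost (i+1) := by
      unfold pvFM
      rw [ih (by omega) _ hsrc2 hsrc1]
    by_cases hpos : 0 < pvCI cost (i+1)
    · rw [if_pos (by rw [hfc, hfm]; omega)]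
      exact hfc
    · have h0 : pvCI cost (i+1) = 0 := by omega
      rw [if_neg (by rw [hfc, hfm]; omega)]
      show pvFM N cost i (i+1) j = pvMax
      rw [hfm, h0]; ring

-- the always-pay path: J i coupons held after day i, SP i money spent
def pvJ (cost : List Int) : Nat → Nat
  | 0 => 0
  | i+1 => pvJ cost i + (if cost.getD (i+1) 0 > 100 then 1 else 0)

def pvSP (cost : List Int) : Nat → Int
  | 0 => 0
  | i+1 => pvSP cost i + cost.getD (i+1) 0

theorem pvJ_le (cost : List Int) : ∀ i, pvJ cost i ≤ i := by
  intro i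
  induction i with
  | zero => simp [pvJ]
  | succ i ih => unfold pvJ; split <;> omega

theorem pv_val_payall (N : Nat) (cost : List Int) :
    ∀ i ≤ N, (pvCell N cost i (pvJ cost i)).1 ≤ pvSP cost i := by
  intro i
  induction i with
  | zero =>
    intro _
    rw [show pvJ cost 0 = 0 from rfl, pv_cell_zero N cost 0 (by omega), if_pos rfl]
    simp [pvSP]
  | succ i ih =>
    intro hiN
    have hJ : pvJ cost (i+1) ≤ N := le_trans (pvJ_le cost (i+1)) hiN
    rw [pv_cell_eval N cost i (pvJ cost (i+1)) hJ]
    have hJsucc : pvJ cost (i+1) = pvJ cost i + (if cost.getD (i+1) 0 > 100 then 1 else 0) := rfl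
    have hsrc : pvSRC N cost (i+1) (pvJ cost (i+1)) = pvJ cost i := by
      unfold pvSRC pvCI
      by_cases hci : cost.getD (i+1) 0 > 100
      · rw [if_pos hci, hJsucc, if_pos hci, if_neg (by omega)]
        omega
      · rw [if_neg hci, hJsucc, if_neg hci]
        omega
    have hfm : pvFM N cost i (i+1) (pvJ cost (i+1)) ≤ pvSP cost (i+1) := by
      unfold pvFM pvCI pvSP
      rw [hsrc]
      have := ih (by omega)
      omega
    by_cases hbr : pvFC N cost i (pvJ cost (i+1)) < pvFM N cost i (i+1) (pvJ cost (i+1))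
    · rw [if_pos hbr]
      show pvFC N cost i (pvJ cost (i+1)) ≤ pvSP cost (i+1)
      omega
    · rw [if_neg hbr]
      show pvFM N cost i (i+1) (pvJ cost (i+1)) ≤ pvSP cost (i+1)
      omega

theorem pv_path_zero (N : Nat) (cost : List Int) (j : Nat) (hj : j ≤ N) :
    (pvCell N cost 0 j).2 = [] := by
  rw [pv_cell_zero N cost j hj]
  split <;> rfl

-- A's backtracking loop follows exactly the coupon-day list stored in B's cells
theorem pv_bt (N : Nat) (cost : List Int)
    (hcost : ∀ k, 1 ≤ k → k ≤ N → 0 ≤ cost.getD k 0) :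
    ∀ (k : Nat), k ≤ N → ∀ (jn : Nat), jn ≤ N → (pvCell N cost k jn).1 < pvMax →
    ∀ (acc : List Int × Int),
      lunchesBT (pvPrevState N cost N) k ((jn : Nat) : Int) acc
      = (acc.1 ++ (pvCell N cost k jn).2.reverse, acc.2 + ((pvCell N cost k jn).2.length : Int)) := by
  intro k
  induction k with
  | zero =>
    intro _ jn hjn _ acc
    rw [pv_path_zero N cost jn hjn]
    simp [lunchesBT]
  | succ k ih =>
    intro hkN jn hjn hv acc
    have hci0 : 0 ≤ pvCI cost (k+1) := hcost (k+1) (by omega) (by omega)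
    unfold lunchesBT
    have hrow : PySem.List.pyGetD (pvPrevState N cost N) ((k : Int)+1) []
        = pvPrevRow N cost (k+1) := by
      rw [show ((k : Int) + 1) = ((k+1 : Nat) : Int) by push_cast; ring, PySem.List.pyGetD_natCast]
      unfold pvPrevState
      rw [pv_getD_map_range (N+1) (k+1) _ [] (by omega), if_pos hkN]
    rw [hrow, pv_prev_entry N cost k jn hjn]
    rw [pv_cell_eval N cost k jn hjn] at hv ⊢
    by_cases hbr : pvFC N cost k jn < pvFM N cost k (k+1) jn
    · -- coupon used on day k+1
      rw [if_pos hbr] at hv ⊢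
      have hfc : pvFC N cost k jn < pvMax := hv
      have hjN : jn < N := by
        by_contra hno
        have : pvFC N cost k jn = pvMax := by unfold pvFC; rw [if_neg hno]
        omega
      have hfc' : (pvCell N cost k (jn+1)).1 < pvMax := by
        have : pvFC N cost k jn = (pvCell N cost k (jn+1)).1 := by unfold pvFC; rw [if_pos hjN]
        omega
      dsimp only
      rw [if_pos (rfl : (-1 : Int) = -1)]
      rw [show ((jn : Int) + 1) = ((jn+1 : Nat) : Int) by push_cast; ring]
      rw [ih (by omega) (jn+1) (by omega) hfc' (acc.1 ++ [(k : Int)+1], acc.2 + 1)]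
      simp only [if_pos hbr, if_pos hjN, List.reverse_append, List.reverse_cons,
        List.reverse_nil, List.nil_append, List.singleton_append, List.length_append,
        List.length_cons, List.length_nil, Prod.mk.injEq]
      constructor
      · simp [List.append_assoc]
      · push_cast; ring
    · -- paid with money on day k+1
      rw [if_neg hbr] at hv ⊢
      have hfm : pvFM N cost k (k+1) jn < pvMax := hv
      have hsrc' : (pvCell N cost k (pvSRC N cost (k+1) jn)).1 < pvMax := by
        unfold pvFM at hfm
        omega
      have hsrcle : pvSRC N cost (k+1) jn ≤ N := by
        unfold pvSRC; split_ifs <;> omega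
      by_cases hci : pvCI cost (k+1) > 100
      · -- coupon granted, one coupon spent from the budget index
        have hj0 : jn ≠ 0 := by
          intro h0
          have hsrcN : pvSRC N cost (k+1) jn = N := by
            unfold pvSRC; rw [if_pos hci, h0, if_pos rfl]
          have : (pvCell N cost k N).1 = pvMax :=
            pv_val_diag N cost hcost k (by omega) N (by omega) (by omega)
          rw [hsrcN] at hsrc'
          omega
        have hsrceq : pvSRC N cost (k+1) jn = jn - 1 := by
          unfold pvSRC; rw [if_pos hci, if_neg hj0]
        rw [if_pos hci]
        dsimp only
        rw [if_neg (by norm_num : ¬ ((1 : Int) = -1))]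
        rw [show ((jn : Int) - 1) = ((jn - 1 : Nat) : Int) by omega]
        rw [ih (by omega) (jn - 1) (by omega) (by rw [← hsrceq]; exact hsrc') acc]
        rw [hsrceq]
        simp only [if_neg hbr]
      · rw [if_neg hci]
        dsimp only
        rw [if_neg (by norm_num : ¬ ((0 : Int) = -1))]
        have hsrceq : pvSRC N cost (k+1) jn = jn := by
          unfold pvSRC
          rw [if_neg (by exact hci)]
        rw [ih (by omega) jn hjn (by rw [← hsrceq]; exact hsrc') acc]
        rw [hsrceq]
        simp only [if_neg hbr]

-- the last dp row (values only) and A/B's shared selection data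
def pvVals (N : Nat) (cost : List Int) : List Int := (pvRowB N cost N).map Prod.fst
def pvBest (N : Nat) (cost : List Int) : Int :=
  (PySem.List.min? (pvVals N cost) (fun v => v)).getD 0
def pvRid (N : Nat) (cost : List Int) : Nat :=
  (PySem.List.index? (pvVals N cost).reverse (pvBest N cost)).getD 0

theorem pvVals_length (N : Nat) (cost : List Int) : (pvVals N cost).length = N + 1 := by
  simp [pvVals, pvRowB_length]

theorem pvVals_ne (N : Nat) (cost : List Int) : pvVals N cost ≠ [] := by
  intro h
  have := pvVals_length N cost
  rw [h] at this
  simp at this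

theorem pvVals_getElem (N : Nat) (cost : List Int) (j : Nat) (h : j < N + 1) :
    (pvVals N cost)[j]'(by rw [pvVals_length]; omega) = (pvCell N cost N j).1 := by
  unfold pvVals pvCell
  rw [List.getElem_map]
  rw [List.getD_eq_getElem _ _ (by rw [pvRowB_length]; omega)]

theorem pvVals_le (N : Nat) (cost : List Int) : ∀ v ∈ pvVals N cost, v ≤ pvMax := by
  intro v hv
  obtain ⟨j, hj, rfl⟩ := List.mem_iff_getElem.mp hv
  have hj' : j < N + 1 := by rw [pvVals_length] at hj; exact hj
  rw [pvVals_getElem N cost j hj']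
  exact pv_val_le N cost N j (by omega)

theorem pv_min_some (N : Nat) (cost : List Int) :
    PySem.List.min? (pvVals N cost) (fun v => v) = some (pvBest N cost) := by
  cases h : PySem.List.min? (pvVals N cost) (fun v => v) with
  | none => exact absurd ((PySem.List.min?_eq_none_iff _ _).mp h) (pvVals_ne N cost)
  | some m => simp [pvBest, h]

theorem pv_index_some (N : Nat) (cost : List Int) :
    PySem.List.index? (pvVals N cost).reverse (pvBest N cost) = some (pvRid N cost) := by
  have hmem : pvBest N cost ∈ (pvVals N cost).reverse := by
    rw [List.mem_reverse]
    exact PySem.List.min?_mem (pv_min_some N cost)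
  obtain ⟨k, hk⟩ := Option.isSome_iff_exists.mp ((PySem.List.index?_isSome_iff _ _).mpr hmem)
  unfold pvRid
  rw [hk]
  rfl

theorem pvRid_lt (N : Nat) (cost : List Int) : pvRid N cost < N + 1 := by
  obtain ⟨hk, -, -⟩ := PySem.List.getElem_of_index?_eq_some (pv_index_some N cost)
  rw [List.length_reverse, pvVals_length] at hk
  exact hk

theorem pv_val_at_rid (N : Nat) (cost : List Int) :
    (pvCell N cost N (N - pvRid N cost)).1 = pvBest N cost := by
  obtain ⟨hk, hval, -⟩ := PySem.List.getElem_of_index?_eq_some (pv_index_some N cost)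
  rw [List.getElem_reverse] at hval
  have h2 : N - pvRid N cost < N + 1 := by omega
  have hq : (pvVals N cost)[(pvVals N cost).length - 1 - pvRid N cost]? = some (pvBest N cost) := by
    rw [List.getElem?_eq_getElem (by rw [pvVals_length]; omega)]
    exact congrArg some hval
  rw [show (pvVals N cost).length - 1 - pvRid N cost = N - pvRid N cost from by
    rw [pvVals_length]; omega] at hq
  rw [← pvVals_getElem N cost _ h2]
  rw [List.getElem?_eq_getElem (by rw [pvVals_length]; omega)] at hq
  exact Option.some.inj hq

theorem pv_best_lt (N : Nat) (cost : List Int) (hsum : pvSP cost N < pvMax) :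
    pvBest N cost < pvMax := by
  have hJ : pvJ cost N ≤ N := pvJ_le cost N
  have hmem : (pvVals N cost)[pvJ cost N]'(by rw [pvVals_length]; omega) ∈ pvVals N cost :=
    List.getElem_mem _
  have hle := PySem.List.min?_isMin (pv_min_some N cost) _ hmem
  rw [pvVals_getElem N cost _ (by omega)] at hle
  have := pv_val_payall N cost N (le_refl N)
  omega

theorem pv_lastrow (N : Nat) (cost : List Int) :
    PySem.List.pyGetD (pvDpState N cost N) (-1) [] = pvVals N cost := by
  have hne : pvDpState N cost N ≠ [] := by
    intro h
    have : (pvDpState N cost N).length = N + 1 := by simp [pvDpState]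
    rw [h] at this
    simp at this
  rw [PySem.List.pyGetD_neg_one _ _ hne, List.getLast_eq_getElem hne]
  have hlen : (pvDpState N cost N).length - 1 = N := by simp [pvDpState]
  simp only [hlen]
  unfold pvDpState pvVals
  rw [List.getElem_map, List.getElem_range, if_pos (le_refl N)]

-- Pre_ facts in the shape the invariants use
theorem pv_hcost (N : Nat) (cost : List Int)
    (hlen : N = 0 ∨ (N : Int) < (cost.length : Int))
    (hnn : ∀ x ∈ (cost.drop 1).take N, 0 ≤ x) :
    ∀ k, 1 ≤ k → k ≤ N → 0 ≤ cost.getD k 0 := by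
  intro k h1 h2
  have hNlen : N < cost.length := by
    rcases hlen with h | h
    · omega
    · exact_mod_cast h
  have hk : k < cost.length := by omega
  rw [List.getD_eq_getElem _ _ hk]
  apply hnn
  rw [List.mem_iff_getElem]
  refine ⟨k - 1, by simp [List.length_take, List.length_drop]; omega, ?_⟩
  rw [List.getElem_take, List.getElem_drop]
  congr 1
  omega

theorem pv_sum_eq (cost : List Int) :
    ∀ (M : Nat), (M = 0 ∨ (M : Int) < (cost.length : Int)) →
    pvSP cost M = ((cost.drop 1).take M).sum := by
  intro M
  induction M with
  | zero => intro _; simp [pvSP]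
  | succ M ih =>
    intro hlen
    have hMlen : M + 1 < cost.length := by
      rcases hlen with h | h
      · omega
      · exact_mod_cast h
    have hdl : M < (cost.drop 1).length := by simp [List.length_drop]; omega
    rw [show pvSP cost (M+1) = pvSP cost M + cost.getD (M+1) 0 from rfl]
    rw [ih (by right; exact_mod_cast (by omega : M < cost.length))]
    rw [List.take_succ]
    rw [List.getElem?_eq_getElem hdl]
    simp only [Option.toList_some, List.sum_append, List.sum_cons, List.sum_nil, add_zero]
    congr 1
    rw [List.getElem_drop, List.getD_eq_getElem _ _ (by omega)]
    congr 1
    omega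

-- port A, reduced to the reference data
theorem pv_A_reduce (N : Nat) (cost : List Int) :
    lunches ((N : Nat) : Int) cost
    = (pvBest N cost,
       ((PySem.List.enumerate (pvVals N cost) 0).foldl
          (fun (acc : Int × Int) p => if p.2 ≤ acc.1 then (p.2, p.1) else acc) (pvMax, ((N : Nat) : Int))).2,
       (lunchesBT (pvPrevState N cost N) N
          ((PySem.List.enumerate (pvVals N cost) 0).foldl
            (fun (acc : Int × Int) p => if p.2 ≤ acc.1 then (p.2, p.1) else acc) (pvMax, ((N : Nat) : Int))).2
          ([], 0)).2,
       (PySem.List.slice?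
          (lunchesBT (pvPrevState N cost N) N
            ((PySem.List.enumerate (pvVals N cost) 0).foldl
              (fun (acc : Int × Int) p => if p.2 ≤ acc.1 then (p.2, p.1) else acc) (pvMax, ((N : Nat) : Int))).2
            ([], 0)).1 none none (-1)).getD []) := by
  conv_lhs => unfold lunches
  dsimp only
  rw [pv_initA_dp N cost, pv_initA_prev N cost, pv_outerA N cost N (le_refl N)]
  dsimp only
  rw [pv_lastrow N cost]
  simp only [Int.toNat_natCast]
  rfl

-- port B, reduced to the reference data
theorem pv_B_reduce (N : Nat) (cost : List Int) :
    lunches_alt ((N : Nat) : Int) cost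
    = (pvBest N cost,
       ((N : Nat) : Int) - ((pvRid N cost : Nat) : Int),
       (((pvCell N cost N (N - pvRid N cost)).2.length : Nat) : Int),
       (pvCell N cost N (N - pvRid N cost)).2) := by
  conv_lhs => unfold lunches_alt
  dsimp only
  rw [pv_row0 N cost, pv_rowsB N cost N (le_refl N)]
  rw [show PySem.List.pyGetD ((List.range (N+1)).map (pvRowB N cost)) ((N : Nat) : Int) [] = pvRowB N cost N by
    rw [PySem.List.pyGetD_natCast]; exact pv_getD_map_range (N+1) N _ [] (by omega)]
  have hv : List.map (fun (p : Int × List Int) => p.1) (pvRowB N cost N) = pvVals N cost := rfl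
  rw [hv, PySem.List.slice?_none_none_neg_one]
  simp only [Option.getD_some]
  have hb : (PySem.List.min? (pvVals N cost) (fun v => v)).getD 0 = pvBest N cost := rfl
  rw [hb, pv_index_some N cost]
  simp only [Option.getD_some]
  rw [show ((N : Nat) : Int) - ((pvRid N cost : Nat) : Int) = ((N - pvRid N cost : Nat) : Int) by
    have := pvRid_lt N cost; omega]
  rw [show PySem.List.pyGetD (pvRowB N cost N) ((N - pvRid N cost : Nat) : Int) ((0 : Int), ([] : List Int))
      = pvCell N cost N (N - pvRid N cost) by rw [PySem.List.pyGetD_natCast]; rfl]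

-- ===== VERDICT (by name: the statement is the Claim_ definition above) =====
theorem lunches_spec : Claim_equal_lunches := by
  intro n cost hdom hpre
  obtain ⟨hn0, hlen0, hnn0, hsum0⟩ := hpre
  obtain ⟨N, rfl⟩ : ∃ (M : Nat), n = ((M : Nat) : Int) := ⟨n.toNat, (Int.toNat_of_nonneg hn0).symm⟩
  unfold Spec_lunches
  have htn : ((N : Nat) : Int).toNat = N := by omega
  rw [htn] at hnn0 hsum0
  have hlen : N = 0 ∨ (N : Int) < (cost.length : Int) := by
    rcases hlen0 with h | h
    · left; exact_mod_cast h
    · right; exact h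
  have hcost := pv_hcost N cost hlen hnn0
  have hsum : pvSP cost N < pvMax := by
    rw [pv_sum_eq cost N hlen]
    exact hsum0
  rw [pv_A_reduce N cost, pv_B_reduce N cost]
  rw [pv_scan ((N : Nat) : Int) (pvVals N cost) (pvVals_ne N cost) (pvVals_le N cost)]
  dsimp only
  have hsc : ((pvVals N cost).length - 1 -
      (PySem.List.index? (pvVals N cost).reverse
        ((PySem.List.min? (pvVals N cost) (fun v => v)).getD 0)).getD 0 : Nat) = N - pvRid N cost := by
    rw [pvVals_length]
    show N + 1 - 1 - pvRid N cost = N - pvRid N cost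
    omega
  rw [hsc]
  have hval : (pvCell N cost N (N - pvRid N cost)).1 < pvMax := by
    rw [pv_val_at_rid N cost]
    exact pv_best_lt N cost hsum
  rw [pv_bt N cost hcost N (le_refl N) (N - pvRid N cost) (by omega) hval ([], 0)]
  dsimp only
  simp only [List.nil_append, zero_add]
  rw [PySem.List.slice?_none_none_neg_one]
  simp only [Option.getD_some, List.reverse_reverse]
  have h2 : ((N - pvRid N cost : Nat) : Int) = ((N : Nat) : Int) - ((pvRid N cost : Nat) : Int) := by
    have := pvRid_lt N cost
    omega
  rw [h2]
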